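-- pv_equiv track=rewrite | github.com/bobachubs/USOPC | Final/Model/simulation.py | count_medals
-- ===== SOURCE A (Python) =====
-- def count_medals(res_indiv_app, res_indiv_AA, res_team_AA, curr_combo):
--     weighted_medal_count = 0
--     for app in res_indiv_app:
--         athletes = res_indiv_app[app]
--         for athlete in curr_combo:
--             if athlete in athletes:
--               # if athlete is in the apparatus finalist list, increment weighted medal
--               # count based on index
--               # index 0 = 1st place = Gold = 3 points
--               # index 1 = 2nd place = Silver = 2 points
--               # index 2 = 3rd place = Bronze = 1 point
--                 medal_index = athletes.index(athlete)
--                 weighted_medal_count += 3 - medal_index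
--
--     for athlete in res_indiv_AA:
--       # if athlete is in the all around finalist list then increment weighted
--       # medal count based on index
--         if athlete in curr_combo:
--             medal_index = res_indiv_AA.index(athlete)
--             weighted_medal_count += 3 - medal_index
--
--     countries = list(res_team_AA.keys())
--     if 'USA' in countries:
--       # if the USA is in the list of team AA winners then increment weighted
--       # medal count based on index
--         index = countries.index('USA')
--         weighted_medal_count += 3 - index
--
--     return weighted_medal_count  # returns a number
-- ===== SOURCE B (Python) =====
-- def count_medals(res_indiv_app, res_indiv_AA, res_team_AA, curr_combo):
--     # Build one athlete -> apparatus-points table, then sum it over the combo.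
--     pts = {}
--     for athletes in res_indiv_app.values():
--         for i, a in enumerate(athletes):
--             if a not in athletes[:i]:  # first occurrence only (what .index returns)
--                 pts[a] = pts.get(a, 0) + 3 - i
--     total = sum(pts.get(a, 0) for a in curr_combo)
--
--     # All-around: first-occurrence index table, one set-membership pass.
--     combo_set = set(curr_combo)
--     first = {}
--     for i, a in enumerate(res_indiv_AA):
--         first.setdefault(a, i)
--     total += sum(3 - first[a] for a in res_indiv_AA if a in combo_set)
--
--     # Team: scan for USA once.
--     for i, c in enumerate(res_team_AA):
--         if c == 'USA':
--             total += 3 - i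
--             break
--     return total
-- ===== Notes on version B (the rewrite author's own statement) =====
-- stated objective: faster
-- what changed: Instead of rescanning the combo with `in` + `.index` for every apparatus list and calling `.index` on the all-around list per matching athlete, B builds one athlete-to-points table in a single enumerate pass over each finalist list and a first-index table for the all-around list, then sums table lookups over the combo; the USA team bonus is found by one enumerate scan with break.
import Mathlib
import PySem

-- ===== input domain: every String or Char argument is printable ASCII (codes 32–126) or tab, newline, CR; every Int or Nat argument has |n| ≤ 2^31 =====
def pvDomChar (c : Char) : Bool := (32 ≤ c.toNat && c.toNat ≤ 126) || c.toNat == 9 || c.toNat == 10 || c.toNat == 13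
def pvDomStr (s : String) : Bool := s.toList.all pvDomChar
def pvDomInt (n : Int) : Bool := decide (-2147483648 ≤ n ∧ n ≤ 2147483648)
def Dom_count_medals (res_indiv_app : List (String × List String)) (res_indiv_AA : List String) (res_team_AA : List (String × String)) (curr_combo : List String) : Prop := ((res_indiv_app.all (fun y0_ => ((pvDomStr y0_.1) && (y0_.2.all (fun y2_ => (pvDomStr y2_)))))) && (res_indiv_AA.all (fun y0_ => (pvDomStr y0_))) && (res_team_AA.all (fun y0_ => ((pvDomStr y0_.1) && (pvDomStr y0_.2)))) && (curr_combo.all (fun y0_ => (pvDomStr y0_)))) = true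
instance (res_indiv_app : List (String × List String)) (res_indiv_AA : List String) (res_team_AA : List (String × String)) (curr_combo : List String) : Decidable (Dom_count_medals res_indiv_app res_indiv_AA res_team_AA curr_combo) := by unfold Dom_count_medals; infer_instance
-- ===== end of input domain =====

-- B replaces A's per-apparatus rescans of the combo (and repeated `.index` calls) by one
-- athlete→points table built in a single pass plus one sum over the combo (objective: simpler structure).

-- ===== PORT A =====
-- literal transliteration of A: nested membership/`.index` scans; dict keys in insertion
-- order via PySem.Dict.ofList.
def count_medals (res_indiv_app : List (String × List String)) (res_indiv_AA : List String) (res_team_AA : List (String × String)) (curr_combo : List String) : Int :=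
  let d := PySem.Dict.ofList res_indiv_app
  let w1 : Int := d.keys.foldl (fun acc app =>
    let athletes := d.getD app []
    curr_combo.foldl (fun acc athlete =>
      if athletes.contains athlete then
        acc + (3 - (((PySem.List.index? athletes athlete).getD 0 : Nat) : Int))
      else acc) acc) 0
  let w2 : Int := res_indiv_AA.foldl (fun acc athlete =>
    if curr_combo.contains athlete then
      acc + (3 - (((PySem.List.index? res_indiv_AA athlete).getD 0 : Nat) : Int))
    else acc) w1
  let countries := (PySem.Dict.ofList res_team_AA).keys
  if countries.contains "USA" then
    w2 + (3 - (((PySem.List.index? countries "USA").getD 0 : Nat) : Int))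
  else w2

-- ===== PORT B =====
-- one pass over a single finalist list: add 3-i at each first occurrence ('a not in athletes[:i]')
def bStep (athletes : List String) (pts : PySem.Dict String Int) : PySem.Dict String Int :=
  (PySem.List.enumerate athletes 0).foldl (fun pts p =>
    if (PySem.List.slice athletes none (some p.1)).contains p.2 then pts
    else pts.insert p.2 (pts.getD p.2 0 + 3 - p.1)) pts

-- athlete → apparatus points table, accumulated over all finalist lists
def bAppTable (vals : List (List String)) : PySem.Dict String Int :=
  vals.foldl (fun pts athletes => bStep athletes pts) PySem.Dict.empty

-- first-occurrence index table for the all-around list ('first.setdefault(a, i)')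
def bFirst (aa : List String) : PySem.Dict String Int :=
  (PySem.List.enumerate aa 0).foldl (fun d p => d.setdefault p.2 p.1) PySem.Dict.empty

-- 'for i, c in enumerate(res_team_AA): if c == "USA": … break'
def bUsa : List String → Int → Int
  | [], _ => 0
  | c :: rest, i => if c == "USA" then 3 - i else bUsa rest (i + 1)

def count_medals_alt (res_indiv_app : List (String × List String)) (res_indiv_AA : List String) (res_team_AA : List (String × String)) (curr_combo : List String) : Int :=
  let pts := bAppTable (PySem.Dict.ofList res_indiv_app).values
  let total1 : Int := (curr_combo.map (fun a => pts.getD a 0)).sum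
  let comboSet : PySem.Set String := PySem.Set.ofList curr_combo
  let first := bFirst res_indiv_AA
  let total2 : Int := total1 +
    ((res_indiv_AA.filter (fun a => PySem.Set.contains comboSet a)).map
      (fun a => 3 - first.getD a 0)).sum
  total2 + bUsa (PySem.Dict.ofList res_team_AA).keys 0

-- ===== PRECONDITION & SPEC =====
def Spec_count_medals (res_indiv_app : List (String × List String)) (res_indiv_AA : List String) (res_team_AA : List (String × String)) (curr_combo : List String) (out : Int) : Prop := out = count_medals_alt res_indiv_app res_indiv_AA res_team_AA curr_combo
instance (res_indiv_app : List (String × List String)) (res_indiv_AA : List String) (res_team_AA : List (String × String)) (curr_combo : List String) (out : Int) : Decidable (Spec_count_medals res_indiv_app res_indiv_AA res_team_AA curr_combo out) := by unfold Spec_count_medals; infer_instance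

-- ===== CLAIM (what is proved, stated in full; the proofs are below) =====
def Claim_equal_count_medals : Prop := ∀ (res_indiv_app : List (String × List String)) (res_indiv_AA : List String) (res_team_AA : List (String × String)) (curr_combo : List String), Dom_count_medals res_indiv_app res_indiv_AA res_team_AA curr_combo → Spec_count_medals res_indiv_app res_indiv_AA res_team_AA curr_combo (count_medals res_indiv_app res_indiv_AA res_team_AA curr_combo)

-- ===== LEMMAS AND PROOFS =====

-- the weighted points one finalist list v gives one combo athlete a
def gPts (v : List String) (a : String) : Int :=
  if v.contains a then 3 - (((PySem.List.index? v a).getD 0 : Nat) : Int) else 0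

-- 'if p x: acc += f x' accumulation is a sum of an if-map
theorem lemFoldIf (l : List String) (p : String → Bool) (f : String → Int) (acc : Int) :
    l.foldl (fun acc x => if p x then acc + f x else acc) acc
      = acc + (l.map (fun x => if p x then f x else 0)).sum := by
  induction l generalizing acc with
  | nil => simp
  | cons x t ih =>
    simp only [List.foldl_cons, List.map_cons, List.sum_cons, ih]
    split_ifs <;> ring

theorem lemSwap (vs : List (List String)) (cs : List String) :
    (vs.map (fun v => (cs.map (gPts v)).sum)).sum
      = (cs.map (fun a => (vs.map (fun v => gPts v a)).sum)).sum := by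
  induction vs with
  | nil => simp
  | cons v t ih =>
    simp only [List.map_cons, List.sum_cons, ih]
    rw [← List.sum_map_add]

theorem bStep_snoc (u : List String) (x : String) (pts : PySem.Dict String Int) :
    bStep (u ++ [x]) pts =
      (if u.contains x then bStep u pts
       else (bStep u pts).insert x ((bStep u pts).getD x 0 + 3 - (u.length : Int))) := by
  unfold bStep
  rw [PySem.List.enumerate_append, List.foldl_append]
  have hpre : ∀ (d : PySem.Dict String Int),
      (PySem.List.enumerate u 0).foldl (fun pts p =>
        if (PySem.List.slice (u ++ [x]) none (some p.1)).contains p.2 then pts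
        else pts.insert p.2 (pts.getD p.2 0 + 3 - p.1)) d
      = (PySem.List.enumerate u 0).foldl (fun pts p =>
        if (PySem.List.slice u none (some p.1)).contains p.2 then pts
        else pts.insert p.2 (pts.getD p.2 0 + 3 - p.1)) d := by
    intro d
    apply PySem.List.foldl_congr_mem
    intro acc p hp
    rcases (PySem.List.mem_enumerate_iff _ _ _).mp hp with ⟨k, hk, rfl⟩
    have h0 : (0 : Int) + (k : Int) = (k : Int) := by ring
    have hsl : PySem.List.slice (u ++ [x]) none (some ((0:Int) + k)) =
        PySem.List.slice u none (some ((0:Int) + k)) := by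
      rw [h0, PySem.List.slice_to _ (by positivity), PySem.List.slice_to _ (by positivity)]
      simp only [Int.toNat_natCast]
      exact List.take_append_of_le_length (le_of_lt hk)
    rw [hsl]
  rw [hpre]
  have henum : PySem.List.enumerate [x] ((0:Int) + u.length) = [(((u.length : Int)), x)] := by
    simp [PySem.List.enumerate]
  rw [henum]
  simp only [List.foldl_cons, List.foldl_nil]
  have hsl2 : PySem.List.slice (u ++ [x]) none (some ((u.length : Int))) = u := by
    rw [PySem.List.slice_to _ (by positivity)]
    simp
  rw [hsl2]

theorem bStep_getD (v : List String) (pts : PySem.Dict String Int) (a : String) :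
    (bStep v pts).getD a 0 = pts.getD a 0 + gPts v a := by
  induction v using List.reverseRecOn generalizing pts with
  | nil => simp [bStep, gPts, PySem.List.enumerate]
  | append_singleton u x ih =>
    rw [bStep_snoc]
    by_cases hx : x ∈ u
    · have hcu : u.contains x = true := by simp [hx]
      rw [if_pos hcu, ih]
      have : gPts (u ++ [x]) a = gPts u a := by
        unfold gPts
        by_cases ha : a ∈ u
        · rw [PySem.List.index?_append_of_mem [x] ha]
          simp [ha]
        · by_cases hax : a = x
          · exact absurd (hax ▸ hx) ha
          · have hno : a ∉ u ++ [x] := by simp [ha, hax]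
            simp [ha, hno]
      rw [this]
    · have hcu : u.contains x = false := by simp [hx]
      rw [if_neg (by simp [hx]), PySem.Dict.getD_insert, ih]
      by_cases hax : a = x
      · subst hax
        rw [if_pos rfl, ih]
        have h1 : gPts u a = 0 := by simp [gPts, hx]
        have h2 : gPts (u ++ [a]) a = 3 - (u.length : Int) := by
          unfold gPts
          rw [PySem.List.index?_append_singleton_self u a hx]
          simp
        rw [h1, h2]; ring
      · rw [if_neg hax]
        have : gPts (u ++ [x]) a = gPts u a := by
          unfold gPts
          by_cases ha : a ∈ u
          · rw [PySem.List.index?_append_of_mem [x] ha]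
            simp [ha]
          · have hno : a ∉ u ++ [x] := by simp [ha, hax]
            simp [ha, hno]
        rw [this]

theorem lemB1 (vs : List (List String)) (a : String) :
    (bAppTable vs).getD a 0 = (vs.map (fun v => gPts v a)).sum := by
  unfold bAppTable
  suffices h : ∀ (d : PySem.Dict String Int),
      (vs.foldl (fun pts athletes => bStep athletes pts) d).getD a 0
        = d.getD a 0 + (vs.map (fun v => gPts v a)).sum by
    rw [h]; simp
  induction vs with
  | nil => simp
  | cons v t ih =>
    intro d
    simp only [List.foldl_cons, List.map_cons, List.sum_cons, ih, bStep_getD]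
    ring

theorem lemUsa (l : List String) (i : Int) :
    bUsa l i = if l.contains "USA" then
      3 - (i + (((PySem.List.index? l "USA").getD 0 : Nat) : Int)) else 0 := by
  induction l generalizing i with
  | nil => simp [bUsa]
  | cons c t ih =>
    by_cases hc : c = "USA"
    · subst hc
      simp [bUsa]
    · have hb : (c == "USA") = false := by simp [hc]
      rw [bUsa]
      simp only [hb, Bool.false_eq_true, if_false]
      rw [ih, PySem.List.index?_cons_of_ne t hc]
      rcases h : PySem.List.index? t "USA" with _ | k
      · have hnm : "USA" ∉ t := (PySem.List.index?_eq_none_iff t "USA").mp h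
        simp [hnm]
        intro hcon
        exact absurd hcon.symm hc
      · have hmem : "USA" ∈ t := (PySem.List.index?_isSome_iff t "USA").mp (by rw [h]; rfl)
        have hm2 : (c :: t).contains "USA" = true := by simp [hmem]
        have hm1 : t.contains "USA" = true := by simp [hmem]
        rw [hm1, hm2]
        simp only [if_true, Option.map_some, Option.getD_some]
        push_cast; ring

theorem lemFirstAux (aa : List String) (s : Int) (d : PySem.Dict String Int) (a : String) :
    ((PySem.List.enumerate aa s).foldl (fun d p => d.setdefault p.2 p.1) d).getD a 0 =
      if d.contains a then d.getD a 0
      else (PySem.List.index? aa a).elim 0 (fun k => s + (k : Int)) := by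
  induction aa generalizing s d with
  | nil =>
    simp only [PySem.List.enumerate_nil, List.foldl_nil, PySem.List.index?, Option.elim]
    rcases h : d.contains a with _ | _
    · simp [PySem.Dict.getD_of_not_contains d 0 h]
    · simp
  | cons x t ih =>
    rw [PySem.List.enumerate_cons, List.foldl_cons, ih]
    by_cases hax : a = x
    · subst hax
      have hc : (d.setdefault a s).contains a = true := by
        rw [PySem.Dict.contains_setdefault]; simp
      rw [if_pos hc, PySem.Dict.getD_setdefault_self, PySem.List.index?_cons_self]
      rcases h : d.contains a with _ | _
      · rw [if_neg (by simp [h])]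
        simp [PySem.Dict.getD_of_not_contains d s h]
      · rw [if_pos rfl]
        rcases hg : d.get? a with _ | v
        · rw [PySem.Dict.contains_eq_isSome_get?, hg] at h; simp at h
        · rw [PySem.Dict.getD_eq_get?_getD, PySem.Dict.getD_eq_get?_getD, hg]
          rfl
    · have hc : (d.setdefault x s).contains a = d.contains a := by
        rw [PySem.Dict.contains_setdefault]
        simp [hax]
      rw [hc]
      have hg : (d.setdefault x s).getD a 0 = d.getD a 0 := by
        rw [PySem.Dict.getD_eq_get?_getD, PySem.Dict.getD_eq_get?_getD,
          PySem.Dict.get?_setdefault_of_ne d s hax]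
      rw [hg, PySem.List.index?_cons_of_ne t (Ne.symm hax)]
      rcases h : PySem.List.index? t a with _ | k
      · simp
      · simp only [Option.map_some, Option.elim]
        split_ifs
        · rfl
        · push_cast; ring

theorem lemFirst (aa : List String) (a : String) (h : a ∈ aa) :
    (bFirst aa).getD a 0 = (((PySem.List.index? aa a).getD 0 : Nat) : Int) := by
  unfold bFirst
  rw [lemFirstAux]
  rcases hk : PySem.List.index? aa a with _ | k
  · exact absurd ((PySem.List.index?_eq_none_iff aa a).mp hk) (by simpa using h)
  · simp [PySem.Dict.contains_empty]

theorem lemFilt (l : List String) (p : String → Bool) (f : String → Int) :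
    ((l.filter p).map f).sum = (l.map (fun x => if p x then f x else 0)).sum := by
  induction l with
  | nil => rfl
  | cons x t ih =>
    by_cases h : p x <;> simp [List.filter_cons, h, ih]

theorem setContains_ofList (l : List String) (x : String) :
    PySem.Set.contains (PySem.Set.ofList l) x = l.contains x := by
  by_cases hx : x ∈ l
  · simp [PySem.Set.contains, (PySem.Set.mem_ofList l x).mpr hx, hx]
  · simp [PySem.Set.contains, hx, fun h => hx ((PySem.Set.mem_ofList l x).mp h)]

-- ===== VERDICT (by name: the statement is the Claim_ definition above) =====
theorem count_medals_spec : Claim_equal_count_medals := by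
  intro res_indiv_app res_indiv_AA res_team_AA curr_combo _
  unfold Spec_count_medals count_medals count_medals_alt
  simp only []
  set d := PySem.Dict.ofList res_indiv_app with hd
  -- apparatus part
  have happ : d.keys.foldl (fun acc app =>
      let athletes := d.getD app []
      curr_combo.foldl (fun acc athlete =>
        if athletes.contains athlete then
          acc + (3 - (((PySem.List.index? athletes athlete).getD 0 : Nat) : Int))
        else acc) acc) 0
      = (curr_combo.map (fun a => (bAppTable d.values).getD a 0)).sum := by
    have step1 : ∀ (acc : Int), ∀ app ∈ d.keys,
        (let athletes := d.getD app []
         curr_combo.foldl (fun acc athlete =>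
           if athletes.contains athlete then
             acc + (3 - (((PySem.List.index? athletes athlete).getD 0 : Nat) : Int))
           else acc) acc)
        = acc + (curr_combo.map (gPts (d.getD app []))).sum := by
      intro acc app _
      exact lemFoldIf curr_combo _ _ acc
    rw [PySem.List.foldl_congr_mem _ _
      (fun acc app => acc + (curr_combo.map (gPts (d.getD app []))).sum) 0 step1,
      PySem.List.foldl_add, zero_add]
    have hvals : d.values = d.keys.map (fun k => d.getD k []) :=
      PySem.Dict.values_eq_map_keys d (PySem.Dict.nodup_keys_ofList res_indiv_app) []
    calc (d.keys.map (fun app => (curr_combo.map (gPts (d.getD app []))).sum)).sum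
        = ((d.keys.map (fun k => d.getD k [])).map
            (fun v => (curr_combo.map (gPts v)).sum)).sum := by rw [List.map_map]; rfl
      _ = (d.values.map (fun v => (curr_combo.map (gPts v)).sum)).sum := by rw [hvals]
      _ = (curr_combo.map (fun a => (d.values.map (fun v => gPts v a)).sum)).sum :=
          lemSwap d.values curr_combo
      _ = (curr_combo.map (fun a => (bAppTable d.values).getD a 0)).sum := by
          exact congrArg List.sum (List.map_congr_left (fun a _ => (lemB1 d.values a).symm))
  rw [happ]
  -- all-around part
  have haa : ∀ (w : Int), res_indiv_AA.foldl (fun acc athlete =>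
      if curr_combo.contains athlete then
        acc + (3 - (((PySem.List.index? res_indiv_AA athlete).getD 0 : Nat) : Int))
      else acc) w
      = w + ((res_indiv_AA.filter (fun a => PySem.Set.contains (PySem.Set.ofList curr_combo) a)).map
          (fun a => 3 - (bFirst res_indiv_AA).getD a 0)).sum := by
    intro w
    rw [lemFoldIf, lemFilt]
    congr 1
    apply congrArg List.sum
    apply List.map_congr_left
    intro x hx
    rw [setContains_ofList]
    by_cases hc : curr_combo.contains x
    · rw [if_pos hc, if_pos hc, lemFirst res_indiv_AA x hx]
    · rw [if_neg (by simp_all), if_neg (by simp_all)]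
  rw [haa]
  -- team part
  rw [lemUsa (PySem.Dict.ofList res_team_AA).keys 0]
  rcases hus : (PySem.Dict.ofList res_team_AA).keys.contains "USA" with _ | _
  · simp [hus]
  · simp [hus]
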